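-- pv_equiv track=rewrite | github.com/theadamsfamily1981-max/Ara | arasong/synth/oscillators.py | parse_chord
-- ===== SOURCE A (Python) =====
-- from typing import List, Tuple
--
-- def parse_chord(chord_name: str) -> Tuple[str, str, int]:
--     """Parse chord name into (root, quality, octave)."""
--     # Handle accidentals
--     if len(chord_name) >= 2 and chord_name[1] in '#b':
--         root = chord_name[:2]
--         rest = chord_name[2:]
--     else:
--         root = chord_name[0]
--         rest = chord_name[1:]
--
--     # Default quality and octave
--     quality = 'maj'
--     octave = 3
--
--     # Parse quality
--     for q in ['maj7', 'min7', 'm7', '7', 'dim', 'aug', 'sus2', 'sus4', 'min', 'm']: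
--         if rest.startswith(q):
--             quality = q
--             rest = rest[len(q):]
--             break
--
--     # Parse octave if present
--     if rest.isdigit():
--         octave = int(rest)
--
--     return root, quality, octave
-- ===== SOURCE B (Python) =====
-- def _quality(rest):
--     """Decision tree on the leading characters; '' means no quality token."""
--     c = rest[:1]
--     if c == 'm':
--         if rest.startswith('maj7'):
--             return 'maj7'
--         if rest.startswith('min7'):
--             return 'min7'
--         if rest[1:2] == '7':
--             return 'm7'
--         if rest.startswith('min'):
--             return 'min'
--         return 'm'
--     if c == '7':
--         return '7'
--     if c == 'd' and rest.startswith('dim'):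
--         return 'dim'
--     if c == 'a' and rest.startswith('aug'):
--         return 'aug'
--     if c == 's':
--         if rest.startswith('sus2'):
--             return 'sus2'
--         if rest.startswith('sus4'):
--             return 'sus4'
--     return ''
--
--
-- def parse_chord(chord_name):
--     """Parse chord name into (root, quality, octave)."""
--     root_len = 2 if chord_name[1:2] in ('#', 'b') else 1
--     root, rest = chord_name[:root_len], chord_name[root_len:]
--     q = _quality(rest)
--     tail = rest[len(q):]
--     return root, (q or 'maj'), int(tail) if tail.isdigit() else 3
-- ===== Notes on version B (the rewrite author's own statement) =====
-- stated objective: alternative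
-- what changed: B replaces A's break-out scan over the priority list of quality tokens with a decision tree on the leading characters (branching on 'm'/'7'/'d'/'a'/'s' with ordered prefix tests inside each branch) and splits the root off by slicing on a computed root length instead of A's two-branch index/slice code.
import Mathlib
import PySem

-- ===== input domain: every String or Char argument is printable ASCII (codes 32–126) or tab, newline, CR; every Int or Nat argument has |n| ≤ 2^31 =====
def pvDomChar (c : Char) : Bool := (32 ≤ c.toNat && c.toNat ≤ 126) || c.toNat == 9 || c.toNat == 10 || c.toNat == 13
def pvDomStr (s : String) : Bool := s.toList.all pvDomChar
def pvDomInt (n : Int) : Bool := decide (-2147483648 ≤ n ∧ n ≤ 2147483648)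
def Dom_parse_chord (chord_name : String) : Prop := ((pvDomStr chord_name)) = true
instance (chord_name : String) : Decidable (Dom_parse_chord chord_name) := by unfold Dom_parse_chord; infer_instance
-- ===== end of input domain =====

-- B replaces A's priority-list scan over quality tokens by a decision tree on the leading
-- characters and slice-based root splitting (objective: alternative decomposition, same cost).

-- ===== PORT A =====
def pvQualities : List (List Char) :=
  ["maj7".toList, "min7".toList, "m7".toList, "7".toList, "dim".toList,
   "aug".toList, "sus2".toList, "sus4".toList, "min".toList, "m".toList]

-- the for-loop with break: take the first q that rest starts with; default quality 'maj', rest unchanged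
def pvAQualLoop (qs : List (List Char)) (rest : List Char) : List Char × List Char :=
  match qs with
  | [] => ("maj".toList, rest)
  | q :: qs' =>
    if PySem.Chars.startswith rest q then (q, PySem.List.slice rest (some (q.length : Int)) none)
    else pvAQualLoop qs' rest

def parse_chord (chord_name : String) : String × String × Int :=
  let cs := chord_name.toList
  let rr : List Char × List Char :=
    -- chord_name[1] in '#b' : single-char membership in the two-char string
    if 2 ≤ cs.length ∧ ((PySem.List.pyGet? cs 1).getD ' ') ∈ "#b".toList then
      (PySem.List.slice cs none (some 2), PySem.List.slice cs (some 2) none)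
    else
      -- chord_name[0]: IndexError on "" (excluded by Pre_); the getD default is unreachable under Pre_
      ([(PySem.List.pyGet? cs 0).getD ' '], PySem.List.slice cs (some 1) none)
  let qr := pvAQualLoop pvQualities rr.2
  -- int(rest): on a strIsdigit string of the ASCII domain ofChars? is some; the getD default is unreachable
  let octave : Int := if PySem.Chars.strIsdigit qr.2 then (PySem.Int.ofChars? qr.2).getD 3 else 3
  (String.ofList rr.1, String.ofList qr.1, octave)

-- ===== PORT B =====
def pvBQuality (rest : List Char) : List Char :=
  let c := PySem.List.slice rest none (some 1)
  if c = ['m'] then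
    if PySem.Chars.startswith rest "maj7".toList then "maj7".toList
    else if PySem.Chars.startswith rest "min7".toList then "min7".toList
    else if PySem.List.slice rest (some 1) (some 2) = ['7'] then "m7".toList
    else if PySem.Chars.startswith rest "min".toList then "min".toList
    else "m".toList
  else if c = ['7'] then "7".toList
  else if c = ['d'] ∧ PySem.Chars.startswith rest "dim".toList then "dim".toList
  else if c = ['a'] ∧ PySem.Chars.startswith rest "aug".toList then "aug".toList
  else if c = ['s'] then
    if PySem.Chars.startswith rest "sus2".toList then "sus2".toList
    else if PySem.Chars.startswith rest "sus4".toList then "sus4".toList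
    else []
  else []

def parse_chord_alt (chord_name : String) : String × String × Int :=
  let cs := chord_name.toList
  let rootLen : Int := if PySem.List.slice cs (some 1) (some 2) ∈ [['#'], ['b']] then 2 else 1
  let root := PySem.List.slice cs none (some rootLen)
  let rest := PySem.List.slice cs (some rootLen) none
  let q := pvBQuality rest
  let tail := PySem.List.slice rest (some (q.length : Int)) none
  -- int(tail): on a strIsdigit string of the ASCII domain ofChars? is some; the getD default is unreachable
  (String.ofList root, String.ofList (if q = [] then "maj".toList else q),
   if PySem.Chars.strIsdigit tail then (PySem.Int.ofChars? tail).getD 3 else 3)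

-- ===== PRECONDITION & SPEC =====
-- Pre_ excludes only the empty string, on which A raises IndexError (chord_name[0]).
def Pre_parse_chord (chord_name : String) : Prop := chord_name ≠ ""
instance (chord_name : String) : Decidable (Pre_parse_chord chord_name) := by unfold Pre_parse_chord; infer_instance
def pvWitness_parse_chord : String := "C#m7"

def Spec_parse_chord (chord_name : String) (out : String × String × Int) : Prop := out = parse_chord_alt chord_name
instance (chord_name : String) (out : String × String × Int) : Decidable (Spec_parse_chord chord_name out) := by unfold Spec_parse_chord; infer_instance

-- ===== CLAIM (what is proved, stated in full; the proofs are below) =====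
def Claim_equal_parse_chord : Prop := ∀ (chord_name : String), Dom_parse_chord chord_name → Pre_parse_chord chord_name → Spec_parse_chord chord_name (parse_chord chord_name)

-- ===== LEMMAS AND PROOFS =====

lemma pvTok11 : "#b".toList = ['#','b'] := rfl

lemma pvFrom1 (c : Char) (t : List Char) : PySem.List.slice (c::t) (some 1) = t := by
  rw [show (1:Int) = ((1:Nat):Int) from rfl, PySem.List.slice_from_natCast]; rfl

lemma pvFrom2 (c c2 : Char) (t : List Char) : PySem.List.slice (c::c2::t) (some 2) = t := by
  rw [show (2:Int) = ((2:Nat):Int) from rfl, PySem.List.slice_from_natCast]; rfl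


-- A's priority scan computes B's decision-tree quality (with '' rendered as 'maj') and the same leftover.
lemma pvTake1 (c : Char) (t : List Char) : PySem.List.slice (c::t) none (some 1) = [c] := by
  rw [show (1:Int) = ((1:Nat):Int) from rfl, PySem.List.slice_to_natCast]; rfl
lemma pvMid12 (c : Char) (t : List Char) : PySem.List.slice (c::t) (some 1) (some 2) = t.take 1 := by
  rw [show (1:Int) = ((1:Nat):Int) from rfl, show (2:Int) = ((2:Nat):Int) from rfl, PySem.List.slice_natCast]; rfl

lemma pvTok0 : "maj7".toList = ['m','a','j','7'] := rfl
lemma pvTok1 : "min7".toList = ['m','i','n','7'] := rfl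
lemma pvTok2 : "m7".toList = ['m','7'] := rfl
lemma pvTok3 : "7".toList = ['7'] := rfl
lemma pvTok4 : "dim".toList = ['d','i','m'] := rfl
lemma pvTok5 : "aug".toList = ['a','u','g'] := rfl
lemma pvTok6 : "sus2".toList = ['s','u','s','2'] := rfl
lemma pvTok7 : "sus4".toList = ['s','u','s','4'] := rfl
lemma pvTok8 : "min".toList = ['m','i','n'] := rfl
lemma pvTok9 : "m".toList = ['m'] := rfl
lemma pvTok10 : "maj".toList = ['m','a','j'] := rfl

set_option maxHeartbeats 1600000 in
lemma pvQual_eq (rest : List Char) :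
    pvAQualLoop pvQualities rest =
      ((if pvBQuality rest = [] then "maj".toList else pvBQuality rest),
       List.drop (pvBQuality rest).length rest) := by
  cases rest with
  | nil => decide
  | cons c t =>
    by_cases hm : c = 'm'
    · subst hm
      cases t with
      | nil => decide
      | cons c2 t2 =>
        by_cases h7 : c2 = '7'
        · subst h7
          simp only [pvAQualLoop, pvQualities, pvBQuality, pvTake1, pvMid12, pvTok0, pvTok1, pvTok2, pvTok3, pvTok4, pvTok5, pvTok6, pvTok7, pvTok8, pvTok9, pvTok10,
        PySem.Chars.startswith, PySem.List.slice_from_natCast]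
          simp [List.isPrefixOf]
        · simp only [pvAQualLoop, pvQualities, pvBQuality, pvTake1, pvMid12, pvTok0, pvTok1, pvTok2, pvTok3, pvTok4, pvTok5, pvTok6, pvTok7, pvTok8, pvTok9, pvTok10,
        PySem.Chars.startswith, PySem.List.slice_from_natCast]
          simp only [List.take, List.isPrefixOf]
          split_ifs <;> simp_all [Ne.symm h7]
    · have hm' : ('m':Char) ≠ c := fun h => hm h.symm
      by_cases h7 : c = '7'
      · subst h7
        simp only [pvAQualLoop, pvQualities, pvBQuality, pvTake1, pvMid12, pvTok0, pvTok1, pvTok2, pvTok3, pvTok4, pvTok5, pvTok6, pvTok7, pvTok8, pvTok9, pvTok10,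
        PySem.Chars.startswith, PySem.List.slice_from_natCast]
        simp [List.isPrefixOf]
      · by_cases hd : c = 'd'
        · subst hd
          simp only [pvAQualLoop, pvQualities, pvBQuality, pvTake1, pvMid12, pvTok0, pvTok1, pvTok2, pvTok3, pvTok4, pvTok5, pvTok6, pvTok7, pvTok8, pvTok9, pvTok10,
        PySem.Chars.startswith, PySem.List.slice_from_natCast]
          simp [List.isPrefixOf]
          split_ifs <;> simp_all
        · by_cases ha : c = 'a'
          · subst ha
            simp only [pvAQualLoop, pvQualities, pvBQuality, pvTake1, pvMid12, pvTok0, pvTok1, pvTok2, pvTok3, pvTok4, pvTok5, pvTok6, pvTok7, pvTok8, pvTok9, pvTok10,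
        PySem.Chars.startswith, PySem.List.slice_from_natCast]
            simp [List.isPrefixOf]
            split_ifs <;> simp_all
          · by_cases hs : c = 's'
            · subst hs
              simp only [pvAQualLoop, pvQualities, pvBQuality, pvTake1, pvMid12, pvTok0, pvTok1, pvTok2, pvTok3, pvTok4, pvTok5, pvTok6, pvTok7, pvTok8, pvTok9, pvTok10,
        PySem.Chars.startswith, PySem.List.slice_from_natCast]
              simp [List.isPrefixOf]
              split_ifs <;> simp_all
            · simp only [pvAQualLoop, pvQualities, pvBQuality, pvTake1, pvMid12, pvTok0, pvTok1, pvTok2, pvTok3, pvTok4, pvTok5, pvTok6, pvTok7, pvTok8, pvTok9, pvTok10,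
        PySem.Chars.startswith, PySem.List.slice_from_natCast]
              simp [List.isPrefixOf, hm, h7, hd, ha, hs, hm', Ne.symm h7, Ne.symm hd, Ne.symm ha, Ne.symm hs]

-- ===== VERDICT (by name: the statement is the Claim_ definition above) =====
theorem parse_chord_spec : Claim_equal_parse_chord := by
  intro s hdom hpre
  unfold Spec_parse_chord
  have hne : s.toList ≠ [] := by
    intro h
    exact hpre (by cases s; simp_all)
  obtain ⟨c, t, hcs⟩ := List.exists_cons_of_ne_nil hne
  cases t with
  | nil =>
    simp [parse_chord, parse_chord_alt, hcs, pvQual_eq,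
      pvTake1, pvMid12, pvFrom1, pvTok10, pvTok11]
  | cons c2 t2 =>
    by_cases hacc : c2 = '#' ∨ c2 = 'b'
    · simp [parse_chord, parse_chord_alt, hcs, pvQual_eq,
        pvMid12, pvFrom2, pvTok10, pvTok11, hacc]
    · simp [parse_chord, parse_chord_alt, hcs, pvQual_eq,
        pvTake1, pvMid12, pvFrom1, pvTok10, pvTok11, hacc]
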